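-- pv_equiv track=rewrite | github.com/CodingEZ/Scrabble-AI | computerRuleChecker.py | getSideCombo
-- ===== SOURCE A (Python) =====
-- def getSideCombo(isRowCombo, spot, occupied):
--     ''' Get the spots that correspond to the side combo in order '''
--     locations = [spot]
--     locator = spot
--     if isRowCombo:
--         while (locator + 15) in occupied:
--             locator += 15
--             locations.append(locator)
--         locator = spot
--         while (locator - 15) in occupied:
--             locator -= 15
--             locations.insert(0, locator)
--     else:
--         while ((locator + 1) in occupied) and (locator%15 != 14):
--             locator += 1
--             locations.append(locator)
--         locator = spot
--         while ((locator - 1) in occupied) and (locator%15 != 0):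
--             locator -= 1
--             locations.insert(0, locator)
--
--     if locations == [spot]:
--         return []
--     return locations
-- ===== SOURCE B (Python) =====
-- def getSideCombo(isRowCombo, spot, occupied):
--     ''' Get the spots that correspond to the side combo in order '''
--     step = 15 if isRowCombo else 1
--     if isRowCombo:
--         line = {v for v in occupied if v % 15 == spot % 15}
--     else:
--         line = {v for v in occupied if v // 15 == spot // 15}
--     cells = sorted(line | {spot})
--     run = []
--     for v in cells:
--         if run and v == run[-1] + step:
--             run.append(v)
--         elif spot in run:
--             break
--         else:
--             run = [v]
--     return run if len(run) > 1 else []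
-- ===== Notes on version B (the rewrite author's own statement) =====
-- stated objective: alternative
-- what changed: B does no bidirectional membership-probing walk at all: it filters the occupied cells lying on spot's row/column line, sorts them (with spot) into a strictly increasing list, and extracts the maximal contiguous block containing spot in a single left-to-right pass, instead of A's two while-loops extending from spot with `in occupied` probes and insert(0)/append accumulation.
import Mathlib
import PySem

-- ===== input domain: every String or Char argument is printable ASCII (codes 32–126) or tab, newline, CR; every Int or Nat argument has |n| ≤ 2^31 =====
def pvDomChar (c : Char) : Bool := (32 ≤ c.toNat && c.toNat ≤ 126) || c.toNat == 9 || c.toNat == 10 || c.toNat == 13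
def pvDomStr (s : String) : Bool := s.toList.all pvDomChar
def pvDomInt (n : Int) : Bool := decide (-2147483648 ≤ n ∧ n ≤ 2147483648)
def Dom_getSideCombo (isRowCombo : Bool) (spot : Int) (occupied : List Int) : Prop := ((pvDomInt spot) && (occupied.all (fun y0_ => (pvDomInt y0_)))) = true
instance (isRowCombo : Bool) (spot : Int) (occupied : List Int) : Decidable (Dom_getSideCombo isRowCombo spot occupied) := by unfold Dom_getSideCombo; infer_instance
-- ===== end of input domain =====

-- B replaces A's bidirectional membership-probing walk by a set/sort algorithm: filter the
-- occupied cells lying on spot's line, sort them together with spot, and take the maximal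
-- contiguous block containing spot in one left-to-right pass (objective: alternative algorithm).

-- ===== PORT A =====
-- A's forward while loop: append locator+d while (locator+d) in occupied and guard(locator).
-- fuel = occupied.length + 1 is a pure totality guard: each iteration reaches a fresh member
-- of occupied, so the Python loop always stops within that many steps.
def pvUpA (occ : List Int) (d : Int) (g : Int → Bool) : Nat → Int → List Int → List Int
  | 0, _, acc => acc
  | f + 1, loc, acc =>
      if occ.contains (loc + d) && g loc then pvUpA occ d g f (loc + d) (acc ++ [loc + d])
      else acc

-- A's backward while loop: insert locator-d at position 0 while (locator-d) in occupied and guard(locator).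
def pvDownA (occ : List Int) (d : Int) (g : Int → Bool) : Nat → Int → List Int → List Int
  | 0, _, acc => acc
  | f + 1, loc, acc =>
      if occ.contains (loc - d) && g loc then pvDownA occ d g f (loc - d) ((loc - d) :: acc)
      else acc

def getSideCombo (isRowCombo : Bool) (spot : Int) (occupied : List Int) : List Int :=
  let fuel := occupied.length + 1
  let locations :=
    if isRowCombo then
      pvDownA occupied 15 (fun _ => true) fuel spot
        (pvUpA occupied 15 (fun _ => true) fuel spot [spot])
    else
      pvDownA occupied 1 (fun loc => PySem.Int.mod loc 15 != 0) fuel spot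
        (pvUpA occupied 1 (fun loc => PySem.Int.mod loc 15 != 14) fuel spot [spot])
  if locations = [spot] then [] else locations

-- ===== PORT B =====
-- B's single pass over the sorted line cells: extend the current block while v == run[-1]+step,
-- stop (break) as soon as the block containing spot is complete, else restart the block at v.
def pvRunB (step s : Int) : List Int → List Int → List Int
  | [], run => run
  | v :: vs, run =>
      if run ≠ [] ∧ v = run.getLastD 0 + step then pvRunB step s vs (run ++ [v])
      else if run.contains s then run
      else pvRunB step s vs [v]

def getSideCombo_alt (isRowCombo : Bool) (spot : Int) (occupied : List Int) : List Int :=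
  let step : Int := if isRowCombo then 15 else 1
  let line : PySem.Set Int :=
    if isRowCombo then
      PySem.Set.ofList (occupied.filter (fun v => PySem.Int.mod v 15 == PySem.Int.mod spot 15))
    else
      PySem.Set.ofList (occupied.filter (fun v => PySem.Int.floordiv v 15 == PySem.Int.floordiv spot 15))
  let cells := PySem.List.sorted (PySem.Set.union line [spot]) (fun x => x) false
  let run := pvRunB step spot cells []
  if run.length > 1 then run else []

-- ===== PRECONDITION & SPEC =====
def Spec_getSideCombo (isRowCombo : Bool) (spot : Int) (occupied : List Int) (out : List Int) : Prop := out = getSideCombo_alt isRowCombo spot occupied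
instance (isRowCombo : Bool) (spot : Int) (occupied : List Int) (out : List Int) : Decidable (Spec_getSideCombo isRowCombo spot occupied out) := by unfold Spec_getSideCombo; infer_instance

-- ===== CLAIM (what is proved, stated in full; the proofs are below) =====
def Claim_equal_getSideCombo : Prop := ∀ (isRowCombo : Bool) (spot : Int) (occupied : List Int), Dom_getSideCombo isRowCombo spot occupied → Spec_getSideCombo isRowCombo spot occupied (getSideCombo isRowCombo spot occupied)

-- ===== LEMMAS AND PROOFS =====

-- the arithmetic progression a, a+d, …, a+d*(n-1)
def pvSeg (a d : Int) (n : Nat) : List Int := (List.range n).map (fun k : Nat => a + d * (k : Int))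

theorem pvSeg_zero (a d : Int) : pvSeg a d 0 = [] := rfl

theorem pvSeg_cons (a d : Int) (n : Nat) : pvSeg a d (n + 1) = a :: pvSeg (a + d) d n := by
  simp only [pvSeg, List.range_succ_eq_map, List.map_cons, List.map_map, Nat.cast_zero,
    mul_zero, add_zero]
  refine congrArg (a :: ·) (List.map_congr_left fun k _ => ?_)
  simp only [Function.comp]; push_cast; ring

theorem pvSeg_length (a d : Int) (n : Nat) : (pvSeg a d n).length = n := by simp [pvSeg]

theorem mem_pvSeg (a d x : Int) (n : Nat) :
    x ∈ pvSeg a d n ↔ ∃ k : Nat, k < n ∧ x = a + d * (k : Int) := by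
  simp [pvSeg, List.mem_range, eq_comm]

theorem pvSeg_snoc (a d : Int) (n : Nat) : pvSeg a d (n + 1) = pvSeg a d n ++ [a + d * n] := by
  simp [pvSeg, List.range_succ]

theorem pvSeg_pairwise (a d : Int) (hd : 0 < d) (n : Nat) :
    (pvSeg a d n).Pairwise (· < ·) := by
  simp only [pvSeg]
  refine List.pairwise_map.mpr ?_
  refine (List.pairwise_lt_range).imp ?_
  intro x y h
  have hxy : (x : Int) < (y : Int) := by exact_mod_cast h
  nlinarith

theorem pvSeg_getLastD (a d : Int) (n : Nat) :
    (pvSeg a d (n + 1)).getLastD 0 = a + d * (n : Int) := by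
  rw [pvSeg_snoc]
  simp

-- ---------- A-side characterisation ----------

theorem pvUpA_raw (occ : List Int) (d : Int) (g : Int → Bool) :
    ∀ (f : Nat) (loc : Int), ∃ k : Nat, k ≤ f ∧
      (∀ acc, pvUpA occ d g f loc acc = acc ++ pvSeg (loc + d) d k) ∧
      (∀ j : Nat, j < k → (occ.contains (loc + d * (j : Int) + d) && g (loc + d * (j : Int))) = true) ∧
      (k < f → (occ.contains (loc + d * (k : Int) + d) && g (loc + d * (k : Int))) = false) := by
  intro f
  induction f with
  | zero =>
    intro loc
    exact ⟨0, le_refl 0, fun acc => by simp [pvUpA, pvSeg_zero], by omega, by omega⟩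
  | succ f ih =>
    intro loc
    by_cases h : (occ.contains (loc + d) && g loc) = true
    · obtain ⟨k, hk, hacc, hall, hmax⟩ := ih (loc + d)
      refine ⟨k + 1, by omega, fun acc => ?_, ?_, ?_⟩
      · rw [pvUpA, if_pos h, hacc, pvSeg_cons]; simp
      · intro j hj
        cases j with
        | zero => simpa using h
        | succ j =>
          have hthis := hall j (by omega)
          have h1 : loc + d * ((j + 1 : Nat) : Int) + d = loc + d + d * (j : Int) + d := by push_cast; ring
          have h2 : loc + d * ((j + 1 : Nat) : Int) = loc + d + d * (j : Int) := by push_cast; ring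
          rw [h1, h2]; exact hthis
      · intro hlt
        have hthis := hmax (by omega)
        have h1 : loc + d * ((k + 1 : Nat) : Int) + d = loc + d + d * (k : Int) + d := by push_cast; ring
        have h2 : loc + d * ((k + 1 : Nat) : Int) = loc + d + d * (k : Int) := by push_cast; ring
        rw [h1, h2]; exact hthis
    · refine ⟨0, by omega, fun acc => ?_, by omega, fun _ => ?_⟩
      · rw [pvUpA, if_neg h]; simp [pvSeg_zero]
      · simpa using h

theorem pvDownA_raw (occ : List Int) (d : Int) (g : Int → Bool) :
    ∀ (f : Nat) (loc : Int), ∃ k : Nat, k ≤ f ∧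
      (∀ acc, pvDownA occ d g f loc acc = pvSeg (loc - d * (k : Int)) d k ++ acc) ∧
      (∀ j : Nat, j < k → (occ.contains (loc - d * (j : Int) - d) && g (loc - d * (j : Int))) = true) ∧
      (k < f → (occ.contains (loc - d * (k : Int) - d) && g (loc - d * (k : Int))) = false) := by
  intro f
  induction f with
  | zero =>
    intro loc
    exact ⟨0, le_refl 0, fun acc => by simp [pvDownA, pvSeg_zero], by omega, by omega⟩
  | succ f ih =>
    intro loc
    by_cases h : (occ.contains (loc - d) && g loc) = true
    · obtain ⟨k, hk, hacc, hall, hmax⟩ := ih (loc - d)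
      refine ⟨k + 1, by omega, fun acc => ?_, ?_, ?_⟩
      · rw [pvDownA, if_pos h, hacc]
        have h1 : loc - d * ((k + 1 : Nat) : Int) = loc - d - d * (k : Int) := by push_cast; ring
        rw [h1, pvSeg_snoc]
        have h2 : loc - d - d * (k : Int) + d * (k : Int) = loc - d := by ring
        rw [h2]
        simp
      · intro j hj
        cases j with
        | zero => simpa using h
        | succ j =>
          have hthis := hall j (by omega)
          have h1 : loc - d * ((j + 1 : Nat) : Int) - d = loc - d - d * (j : Int) - d := by push_cast; ring
          have h2 : loc - d * ((j + 1 : Nat) : Int) = loc - d - d * (j : Int) := by push_cast; ring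
          rw [h1, h2]; exact hthis
      · intro hlt
        have hthis := hmax (by omega)
        have h1 : loc - d * ((k + 1 : Nat) : Int) - d = loc - d - d * (k : Int) - d := by push_cast; ring
        have h2 : loc - d * ((k + 1 : Nat) : Int) = loc - d - d * (k : Int) := by push_cast; ring
        rw [h1, h2]; exact hthis
    · refine ⟨0, by omega, fun acc => ?_, by omega, fun _ => ?_⟩
      · rw [pvDownA, if_neg h]; simp [pvSeg_zero]
      · simpa using h

-- fuel occ.length+1 never runs out going forward: the visited cells are distinct members of occ
theorem pvUpA_pigeon (occ : List Int) (d : Int) (hd : 0 < d) (loc : Int) (k : Nat)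
    (hk : ∀ j : Nat, j < k → occ.contains (loc + d * (j : Int) + d) = true) :
    k ≤ occ.length := by
  by_contra hgt
  have hnd : ((List.range k).map (fun j : Nat => loc + d * (j : Int) + d)).Nodup := by
    refine List.Nodup.map ?_ List.nodup_range
    intro x y hxy
    have hx : d * (x : Int) = d * (y : Int) := by linarith
    exact_mod_cast mul_left_cancel₀ (ne_of_gt hd) hx
  have hsub : ((List.range k).map (fun j : Nat => loc + d * (j : Int) + d)) ⊆ occ := by
    intro x hx
    simp only [List.mem_map, List.mem_range] at hx
    obtain ⟨j, hj, rfl⟩ := hx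
    exact List.contains_iff_mem.mp (hk j hj)
  have := (hnd.subperm hsub).length_le
  simp at this
  omega

theorem pvDownA_pigeon (occ : List Int) (d : Int) (hd : 0 < d) (loc : Int) (k : Nat)
    (hk : ∀ j : Nat, j < k → occ.contains (loc - d * (j : Int) - d) = true) :
    k ≤ occ.length := by
  by_contra hgt
  have hnd : ((List.range k).map (fun j : Nat => loc - d * (j : Int) - d)).Nodup := by
    refine List.Nodup.map ?_ List.nodup_range
    intro x y hxy
    have hx : d * (x : Int) = d * (y : Int) := by linarith
    exact_mod_cast mul_left_cancel₀ (ne_of_gt hd) hx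
  have hsub : ((List.range k).map (fun j : Nat => loc - d * (j : Int) - d)) ⊆ occ := by
    intro x hx
    simp only [List.mem_map, List.mem_range] at hx
    obtain ⟨j, hj, rfl⟩ := hx
    exact List.contains_iff_mem.mp (hk j hj)
  have := (hnd.subperm hsub).length_le
  simp at this
  omega

-- translate A's guard-driven walk into the line predicate onl:
-- Qp v = "v occupied and on spot's line"
def pvQ (occ : List Int) (onl : Int → Bool) (v : Int) : Bool := occ.contains v && onl v

theorem pvUpA_Q (occ : List Int) (d : Int) (hd : 0 < d) (g onl : Int → Bool) (s : Int)
    (hs : onl s = true)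
    (hstep : ∀ loc, onl loc = true →
      (occ.contains (loc + d) && g loc) = pvQ occ onl (loc + d)) :
    ∃ kf : Nat,
      (∀ acc, pvUpA occ d g (occ.length + 1) s acc = acc ++ pvSeg (s + d) d kf) ∧
      (∀ j : Nat, j < kf → pvQ occ onl (s + d * (j : Int) + d) = true) ∧
      pvQ occ onl (s + d * (kf : Int) + d) = false := by
  obtain ⟨k, hk, hacc, hall, hmax⟩ := pvUpA_raw occ d g (occ.length + 1) s
  have honl : ∀ j : Nat, j ≤ k → onl (s + d * (j : Int)) = true := by
    intro j
    induction j with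
    | zero => intro _; simpa using hs
    | succ j ih =>
      intro hj
      have ho := ih (by omega)
      have hc := hall j (by omega)
      rw [hstep _ ho] at hc
      simp only [pvQ, Bool.and_eq_true] at hc
      have he : s + d * ((j + 1 : Nat) : Int) = s + d * (j : Int) + d := by push_cast; ring
      rw [he]
      exact hc.2
  have hklen : k ≤ occ.length := by
    apply pvUpA_pigeon occ d hd s k
    intro j hj
    have hc := hall j hj
    simp only [Bool.and_eq_true] at hc
    exact hc.1
  have hkf : k < occ.length + 1 := by omega
  refine ⟨k, hacc, ?_, ?_⟩
  · intro j hj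
    have hc := hall j hj
    rw [hstep _ (honl j (le_of_lt hj))] at hc
    exact hc
  · have hc := hmax hkf
    rw [hstep _ (honl k (le_refl k))] at hc
    exact hc

theorem pvDownA_Q (occ : List Int) (d : Int) (hd : 0 < d) (g onl : Int → Bool) (s : Int)
    (hs : onl s = true)
    (hstep : ∀ loc, onl loc = true →
      (occ.contains (loc - d) && g loc) = pvQ occ onl (loc - d)) :
    ∃ kb : Nat,
      (∀ acc, pvDownA occ d g (occ.length + 1) s acc = pvSeg (s - d * (kb : Int)) d kb ++ acc) ∧
      (∀ j : Nat, j < kb → pvQ occ onl (s - d * (j : Int) - d) = true) ∧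
      pvQ occ onl (s - d * (kb : Int) - d) = false := by
  obtain ⟨k, hk, hacc, hall, hmax⟩ := pvDownA_raw occ d g (occ.length + 1) s
  have honl : ∀ j : Nat, j ≤ k → onl (s - d * (j : Int)) = true := by
    intro j
    induction j with
    | zero => intro _; simpa using hs
    | succ j ih =>
      intro hj
      have ho := ih (by omega)
      have hc := hall j (by omega)
      rw [hstep _ ho] at hc
      simp only [pvQ, Bool.and_eq_true] at hc
      have he : s - d * ((j + 1 : Nat) : Int) = s - d * (j : Int) - d := by push_cast; ring
      rw [he]
      exact hc.2
  have hklen : k ≤ occ.length := by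
    apply pvDownA_pigeon occ d hd s k
    intro j hj
    have hc := hall j hj
    simp only [Bool.and_eq_true] at hc
    exact hc.1
  have hkf : k < occ.length + 1 := by omega
  refine ⟨k, hacc, ?_, ?_⟩
  · intro j hj
    have hc := hall j hj
    rw [hstep _ (honl j (le_of_lt hj))] at hc
    exact hc
  · have hc := hmax hkf
    rw [hstep _ (honl k (le_refl k))] at hc
    exact hc

-- ---------- B-side: pvRunB on a strictly increasing list ----------

theorem pvRunB_nil (d s : Int) (run : List Int) : pvRunB d s [] run = run := rfl

theorem pvRunB_cons_ext (d s v : Int) (vs run : List Int) (h1 : run ≠ []) (h2 : v = run.getLastD 0 + d) :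
    pvRunB d s (v :: vs) run = pvRunB d s vs (run ++ [v]) := by
  rw [pvRunB, if_pos ⟨h1, h2⟩]

theorem pvRunB_cons_stop (d s v : Int) (vs run : List Int) (h : ¬ (run ≠ [] ∧ v = run.getLastD 0 + d))
    (hs : run.contains s = true) : pvRunB d s (v :: vs) run = run := by
  rw [pvRunB, if_neg h, if_pos hs]

theorem pvRunB_cons_new (d s v : Int) (vs run : List Int) (h : ¬ (run ≠ [] ∧ v = run.getLastD 0 + d))
    (hs : run.contains s = false) : pvRunB d s (v :: vs) run = pvRunB d s vs [v] := by
  rw [pvRunB, if_neg h, if_neg (fun hc => by rw [hs] at hc; exact Bool.false_ne_true hc)]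

theorem pvGetLastD_mem (l : List Int) (h : l ≠ []) : l.getLastD 0 ∈ l := by
  induction l with
  | nil => exact absurd rfl h
  | cons v vs ih =>
    cases vs with
    | nil => simp
    | cons w ws =>
      rw [show (v :: w :: ws).getLastD 0 = (w :: ws).getLastD 0 by simp]
      exact List.mem_cons_of_mem _ (ih (by simp))

-- consume a chain continuing the current run
theorem pvRunB_chain (d s : Int) (k : Nat) :
    ∀ (run : List Int) (x : Int) (rest : List Int), run ≠ [] → run.getLastD 0 = x →
      pvRunB d s (pvSeg (x + d) d k ++ rest) run = pvRunB d s rest (run ++ pvSeg (x + d) d k) := by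
  induction k with
  | zero => intro run x rest h1 h2; simp [pvSeg_zero]
  | succ k ih =>
    intro run x rest h1 h2
    rw [pvSeg_cons, List.cons_append, pvRunB_cons_ext d s _ _ _ h1 (by rw [h2])]
    rw [ih (run ++ [x + d]) (x + d) rest (by simp) (by simp)]
    rw [List.append_assoc]
    rfl

-- stop: s already in run and the next element (if any) does not continue it
theorem pvRunB_stop (d s : Int) (run rest : List Int) (hs : s ∈ run)
    (h : ∀ v vs, rest = v :: vs → v ≠ run.getLastD 0 + d) :
    pvRunB d s rest run = run := by
  cases rest with
  | nil => exact pvRunB_nil d s run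
  | cons v vs =>
    exact pvRunB_cons_stop d s v vs run (fun hc => h v vs rfl hc.2)
      (List.contains_iff_mem.mpr hs)

-- skip a prefix not containing s: the run ends at the prefix's last element
theorem pvRunB_skip (d s : Int) :
    ∀ (b : List Int) (run : List Int) (rest : List Int), b ≠ [] → s ∉ b → s ∉ run →
      ∃ run', pvRunB d s (b ++ rest) run = pvRunB d s rest run' ∧ run' ≠ [] ∧
        run'.getLastD 0 = b.getLastD 0 ∧ s ∉ run' := by
  intro b
  induction b with
  | nil => intro run rest h; exact absurd rfl h
  | cons v vs ih =>
    intro run rest hne hsb hsr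
    have hsv : s ≠ v := fun h => hsb (h ▸ List.mem_cons_self)
    have hsvs : s ∉ vs := fun h => hsb (List.mem_cons_of_mem _ h)
    have hcf : run.contains s = false := by
      rw [Bool.eq_false_iff]
      intro hc
      exact hsr (List.contains_iff_mem.mp hc)
    by_cases hc : run ≠ [] ∧ v = run.getLastD 0 + d
    · have hstep := pvRunB_cons_ext d s v (vs ++ rest) run hc.1 hc.2
      have hsrv : s ∉ run ++ [v] := fun h =>
        (List.mem_append.mp h).elim hsr (fun h2 => hsv (by simpa using h2))
      cases vs with
      | nil =>
        exact ⟨run ++ [v], by simpa using hstep, by simp, by simp, hsrv⟩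
      | cons w ws =>
        obtain ⟨run', h1, h2, h3, h4⟩ := ih (run ++ [v]) rest (by simp) hsvs hsrv
        refine ⟨run', ?_, h2, ?_, h4⟩
        · rw [List.cons_append, hstep]; exact h1
        · rw [h3]; simp
    · have hstep := pvRunB_cons_new d s v (vs ++ rest) run hc hcf
      cases vs with
      | nil =>
        exact ⟨[v], by simpa using hstep, by simp, by simp, by simp [hsv]⟩
      | cons w ws =>
        obtain ⟨run', h1, h2, h3, h4⟩ := ih [v] rest (by simp) hsvs (by simp [hsv])
        refine ⟨run', ?_, h2, ?_, h4⟩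
        · rw [List.cons_append, hstep]; exact h1
        · rw [h3]; simp

-- main B lemma: pvRunB over b ++ mid ++ a returns mid
theorem pvRunB_main (d s : Int) (_hd : 0 < d) (b a : List Int) (m0 : Int) (n : Nat)
    (hsmem : s ∈ pvSeg m0 d (n + 1))
    (hsb : s ∉ b)
    (hb : b.getLastD 0 ≠ m0 - d ∨ b = [])
    (ha : ∀ v vs, a = v :: vs → v ≠ m0 + d * (n : Int) + d) :
    pvRunB d s (b ++ (pvSeg m0 d (n + 1) ++ a)) [] = pvSeg m0 d (n + 1) := by
  have hlast : (pvSeg m0 d (n + 1)).getLastD 0 = m0 + d * (n : Int) := pvSeg_getLastD m0 d n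
  have core : ∀ run, s ∉ run → (run = [] ∨ run.getLastD 0 ≠ m0 - d) →
      pvRunB d s (pvSeg m0 d (n + 1) ++ a) run = pvSeg m0 d (n + 1) := by
    intro run hsr hr
    have hcf : run.contains s = false := by
      rw [Bool.eq_false_iff]
      intro hcon
      exact hsr (List.contains_iff_mem.mp hcon)
    conv_lhs => rw [pvSeg_cons, List.cons_append]
    rw [pvRunB_cons_new d s m0 _ run ?_ hcf]
    · rw [pvRunB_chain d s n [m0] m0 _ (by simp) (by simp)]
      have hform : ([m0] : List Int) ++ pvSeg (m0 + d) d n = pvSeg m0 d (n + 1) := by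
        rw [pvSeg_cons]; rfl
      rw [hform]
      refine pvRunB_stop d s _ a hsmem ?_
      intro v vs hv heq
      exact ha v vs hv (by rw [heq, hlast])
    · intro hcc
      rcases hr with hr | hr
      · exact hcc.1 hr
      · exact hr (by linarith [hcc.2])
  by_cases hbn : b = []
  · subst hbn
    simpa using core [] (by simp) (Or.inl rfl)
  · obtain ⟨run', h1, h2, h3, h4⟩ := pvRunB_skip d s b [] (pvSeg m0 d (n + 1) ++ a) hbn hsb (by simp)
    rw [h1]
    apply core run' h4
    right
    rw [h3]
    rcases hb with hb | hb
    · exact hb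
    · exact absurd hb hbn

-- ---------- sorted split ----------

theorem pairwise_lt_split (l : List Int) (x : Int) (h : l.Pairwise (· < ·)) :
    l = l.filter (fun v => decide (v < x)) ++ l.filter (fun v => decide (x ≤ v)) := by
  induction l with
  | nil => rfl
  | cons hd tl ih =>
    rw [List.pairwise_cons] at h
    obtain ⟨hhd, htl⟩ := h
    by_cases hx : hd < x
    · have hnot : ¬ (x ≤ hd) := not_le.mpr hx
      rw [List.filter_cons_of_pos (by simpa using hx),
        List.filter_cons_of_neg (by simpa using hnot), List.cons_append]
      exact congrArg (hd :: ·) (ih htl)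
    · have hx' : x ≤ hd := not_lt.mp hx
      have h1 : tl.filter (fun v => decide (v < x)) = [] := by
        rw [List.filter_eq_nil_iff]
        intro v hv
        simp only [decide_eq_true_eq, not_lt]
        exact le_trans hx' (le_of_lt (hhd v hv))
      have h2 : tl.filter (fun v => decide (x ≤ v)) = tl := by
        rw [List.filter_eq_self]
        intro v hv
        simp only [decide_eq_true_eq]
        exact le_trans hx' (le_of_lt (hhd v hv))
      rw [List.filter_cons_of_neg (by simpa using hx),
        List.filter_cons_of_pos (by simpa using hx'), h1, h2, List.nil_append]

-- ---------- putting it together ----------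

theorem pvSeg_append (a d : Int) (m n : Nat) :
    pvSeg a d (m + n) = pvSeg a d m ++ pvSeg (a + d * m) d n := by
  induction n with
  | zero => simp [pvSeg_zero]
  | succ n ih =>
    rw [← Nat.add_assoc, pvSeg_snoc, ih, pvSeg_snoc, List.append_assoc]
    congr 3
    push_cast; ring

theorem set_union_singleton (l : List Int) (x : Int) :
    PySem.Set.union (PySem.Set.ofList l) [x] = PySem.Set.ofList (l ++ [x]) := by
  simp [PySem.Set.union, PySem.Set.update, PySem.Set.ofList_eq_foldl, List.foldl_append]

theorem pv_main (occ : List Int) (s d : Int) (hd : 0 < d) (g g' onl : Int → Bool)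
    (hs : onl s = true)
    (hstepF : ∀ loc, onl loc = true →
      (occ.contains (loc + d) && g loc) = pvQ occ onl (loc + d))
    (hstepB : ∀ loc, onl loc = true →
      (occ.contains (loc - d) && g' loc) = pvQ occ onl (loc - d))
    (hform : ∀ v, onl v = true → ∃ t : Int, v = s + d * t) :
    (if pvDownA occ d g' (occ.length + 1) s (pvUpA occ d g (occ.length + 1) s [s]) = [s] then ([] : List Int)
     else pvDownA occ d g' (occ.length + 1) s (pvUpA occ d g (occ.length + 1) s [s])) =
    (if (pvRunB d s (PySem.List.sorted (PySem.Set.ofList (occ.filter onl ++ [s])) (fun x => x) false) []).length > 1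
     then pvRunB d s (PySem.List.sorted (PySem.Set.ofList (occ.filter onl ++ [s])) (fun x => x) false) []
     else []) := by
  obtain ⟨kf, hup, hQf, hQfmax⟩ := pvUpA_Q occ d hd g onl s hs hstepF
  obtain ⟨kb, hdown, hQb, hQbmax⟩ := pvDownA_Q occ d hd g' onl s hs hstepB
  have hA : pvDownA occ d g' (occ.length + 1) s (pvUpA occ d g (occ.length + 1) s [s])
      = pvSeg (s - d * (kb : Int)) d (kb + kf + 1) := by
    rw [hup, hdown]
    have h1 : kb + kf + 1 = kb + (kf + 1) := by omega
    rw [h1, pvSeg_append, pvSeg_cons]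
    have h2 : s - d * (kb : Int) + d * (kb : Int) = s := by ring
    rw [h2]
    rfl
  set cells := PySem.List.sorted (PySem.Set.ofList (occ.filter onl ++ [s])) (fun x => x) false with hc
  have hpw : cells.Pairwise (· < ·) := PySem.List.sorted_ofList_pairwise_lt _
  have hmem : ∀ v, v ∈ cells ↔ (pvQ occ onl v = true ∨ v = s) := by
    intro v
    rw [hc, PySem.List.mem_sorted _ _ _ v, PySem.Set.mem_ofList]
    simp [pvQ, List.mem_filter, Bool.and_eq_true]
  have hQmid : ∀ k : Nat, k < kb + kf + 1 → (s - d * (kb : Int) + d * (k : Int)) ∈ cells := by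
    intro k hk
    rw [hmem]
    rcases lt_trichotomy k kb with h | h | h
    · left
      have hj := hQb (kb - k - 1) (by omega)
      have he : s - d * ((kb - k - 1 : Nat) : Int) - d = s - d * (kb : Int) + d * (k : Int) := by
        have hcast : ((kb - k - 1 : Nat) : Int) = (kb : Int) - (k : Int) - 1 := by omega
        rw [hcast]; ring
      rwa [he] at hj
    · right
      rw [h]; ring
    · left
      have hj := hQf (k - kb - 1) (by omega)
      have he : s + d * ((k - kb - 1 : Nat) : Int) + d = s - d * (kb : Int) + d * (k : Int) := by
        have hcast : ((k - kb - 1 : Nat) : Int) = (k : Int) - (kb : Int) - 1 := by omega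
        rw [hcast]; ring
      rwa [he] at hj
  have hmid_sub : ∀ v ∈ pvSeg (s - d * (kb : Int)) d (kb + kf + 1), v ∈ cells := by
    intro v hv
    rw [mem_pvSeg] at hv
    obtain ⟨k, hk, rfl⟩ := hv
    exact hQmid k hk
  have hcell_sub : ∀ v ∈ cells, s - d * (kb : Int) ≤ v → v ≤ s + d * (kf : Int) →
      v ∈ pvSeg (s - d * (kb : Int)) d (kb + kf + 1) := by
    intro v hv h1 h2
    rcases (hmem v).mp hv with hq | hq
    · simp only [pvQ, Bool.and_eq_true] at hq
      obtain ⟨t, rfl⟩ := hform v hq.2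
      have ht1 : -(kb : Int) ≤ t := by
        by_contra hcon
        nlinarith [mul_pos hd (show (0 : Int) < -t - (kb : Int) by omega)]
      have ht2 : t ≤ (kf : Int) := by
        by_contra hcon
        nlinarith [mul_pos hd (show (0 : Int) < t - (kf : Int) by omega)]
      rw [mem_pvSeg]
      refine ⟨(t + kb).toNat, by omega, ?_⟩
      have hcast : (((t + kb).toNat : Nat) : Int) = t + kb := Int.toNat_of_nonneg (by omega)
      rw [hcast]; ring
    · rw [mem_pvSeg]
      exact ⟨kb, by omega, by rw [hq]; ring⟩
  have hsplit1 := pairwise_lt_split cells (s - d * (kb : Int)) hpw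
  have hpw2 : (cells.filter (fun v => decide (s - d * (kb : Int) ≤ v))).Pairwise (· < ·) :=
    List.Pairwise.filter _ hpw
  have hsplit2 := pairwise_lt_split (cells.filter (fun v => decide (s - d * (kb : Int) ≤ v)))
    (s + d * (kf : Int) + 1) hpw2
  have hmmeq : (cells.filter (fun v => decide (s - d * (kb : Int) ≤ v))).filter
      (fun v => decide (v < s + d * (kf : Int) + 1)) = pvSeg (s - d * (kb : Int)) d (kb + kf + 1) := by
    have hpwm := List.Pairwise.filter (fun v => decide (v < s + d * (kf : Int) + 1)) hpw2
    have hpws := pvSeg_pairwise (s - d * (kb : Int)) d hd (kb + kf + 1)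
    have hiff : ∀ v, v ∈ (cells.filter (fun v => decide (s - d * (kb : Int) ≤ v))).filter
        (fun v => decide (v < s + d * (kf : Int) + 1)) ↔
        v ∈ pvSeg (s - d * (kb : Int)) d (kb + kf + 1) := by
      intro v
      constructor
      · intro hv
        have h2 := List.mem_filter.mp hv
        have h3 := List.mem_filter.mp h2.1
        have hb1 : s - d * (kb : Int) ≤ v := by simpa using h3.2
        have hb2 : v < s + d * (kf : Int) + 1 := by simpa using h2.2
        exact hcell_sub v h3.1 hb1 (by linarith)
      · intro hv
        have hvc := hmid_sub v hv
        rw [mem_pvSeg] at hv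
        obtain ⟨k, hk, hkv⟩ := hv
        have hb1 : s - d * (kb : Int) ≤ v := by
          rw [hkv]
          nlinarith [mul_nonneg (le_of_lt hd) (Int.natCast_nonneg k)]
        have hb2 : v ≤ s + d * (kf : Int) := by
          rw [hkv]
          have hkn : (k : Int) ≤ ((kb + kf : Nat) : Int) := by
            exact_mod_cast Nat.le_of_lt_succ hk
          nlinarith [mul_le_mul_of_nonneg_left hkn (le_of_lt hd)]
        refine List.mem_filter.mpr ⟨List.mem_filter.mpr ⟨hvc, by simpa using hb1⟩, ?_⟩
        simp only [decide_eq_true_eq]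
        omega
    have hndm : ((cells.filter (fun v => decide (s - d * (kb : Int) ≤ v))).filter
        (fun v => decide (v < s + d * (kf : Int) + 1))).Nodup :=
      hpwm.imp (fun h => ne_of_lt h)
    have hnds : (pvSeg (s - d * (kb : Int)) d (kb + kf + 1)).Nodup :=
      hpws.imp (fun h => ne_of_lt h)
    exact List.Perm.eq_of_pairwise (fun a b _ _ h1 h2 => absurd h1 (lt_asymm h2)) hpwm hpws
      ((List.perm_ext_iff_of_nodup hndm hnds).mpr hiff)
  have hm0s : s - d * (kb : Int) ≤ s := by
    nlinarith [mul_nonneg (le_of_lt hd) (Int.natCast_nonneg kb)]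
  have hsml : s ≤ s + d * (kf : Int) := by
    nlinarith [mul_nonneg (le_of_lt hd) (Int.natCast_nonneg kf)]
  have hsbl : s ∉ cells.filter (fun v => decide (v < s - d * (kb : Int))) := by
    intro hv
    have h2 := List.mem_filter.mp hv
    have h3 : s < s - d * (kb : Int) := by simpa using h2.2
    linarith
  have hblast : (cells.filter (fun v => decide (v < s - d * (kb : Int)))).getLastD 0
      ≠ s - d * (kb : Int) - d ∨ cells.filter (fun v => decide (v < s - d * (kb : Int))) = [] := by
    by_cases hbe : cells.filter (fun v => decide (v < s - d * (kb : Int))) = []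
    · right; exact hbe
    · left
      intro heq
      have hmem0 := heq ▸ pvGetLastD_mem _ hbe
      have h2 := List.mem_filter.mp hmem0
      rcases (hmem _).mp h2.1 with hq | hq
      · rw [hQbmax] at hq
        exact Bool.false_ne_true hq
      · nlinarith [mul_nonneg (le_of_lt hd) (Int.natCast_nonneg kb)]
  have haa_head : ∀ v vs, (cells.filter (fun v => decide (s - d * (kb : Int) ≤ v))).filter
      (fun v => decide (s + d * (kf : Int) + 1 ≤ v)) = v :: vs →
      v ≠ s - d * (kb : Int) + d * ((kb + kf : Nat) : Int) + d := by
    intro v vs hv heq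
    have hvin : v ∈ (cells.filter (fun v => decide (s - d * (kb : Int) ≤ v))).filter
        (fun v => decide (s + d * (kf : Int) + 1 ≤ v)) := hv ▸ List.mem_cons_self
    have h2 := List.mem_filter.mp hvin
    have h3 := List.mem_filter.mp h2.1
    have hveq : v = s + d * (kf : Int) + d := by
      rw [heq]; push_cast; ring
    rcases (hmem v).mp h3.1 with hq | hq
    · rw [hveq, hQfmax] at hq
      exact Bool.false_ne_true hq
    · rw [hq] at hveq
      nlinarith [mul_nonneg (le_of_lt hd) (Int.natCast_nonneg kf)]
  have hsmid : s ∈ pvSeg (s - d * (kb : Int)) d (kb + kf + 1) :=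
    (mem_pvSeg _ _ _ _).mpr ⟨kb, by omega, by ring⟩
  have hcells_dec : cells = cells.filter (fun v => decide (v < s - d * (kb : Int))) ++
      (pvSeg (s - d * (kb : Int)) d (kb + kf + 1) ++
       (cells.filter (fun v => decide (s - d * (kb : Int) ≤ v))).filter
         (fun v => decide (s + d * (kf : Int) + 1 ≤ v))) := by
    conv_lhs => rw [hsplit1, hsplit2, hmmeq]
  have hrun : pvRunB d s cells [] = pvSeg (s - d * (kb : Int)) d (kb + kf + 1) := by
    conv_lhs => rw [hcells_dec]
    exact pvRunB_main d s hd _ _ _ (kb + kf) hsmid hsbl hblast haa_head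
  rw [hA, hrun]
  by_cases hz : kb = 0 ∧ kf = 0
  · obtain ⟨h1, h2⟩ := hz
    subst h1; subst h2
    have hseq : pvSeg (s - d * ((0 : Nat) : Int)) d (0 + 0 + 1) = [s] := by
      simp [pvSeg]
    rw [hseq]
    simp
  · have hlen : (pvSeg (s - d * (kb : Int)) d (kb + kf + 1)).length = kb + kf + 1 :=
      pvSeg_length _ _ _
    have hne : pvSeg (s - d * (kb : Int)) d (kb + kf + 1) ≠ [s] := by
      intro hcon
      rw [hcon] at hlen
      simp at hlen
      omega
    have hgt : (pvSeg (s - d * (kb : Int)) d (kb + kf + 1)).length > 1 := by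
      rw [hlen]; omega
    rw [if_neg hne, if_pos hgt]

-- ===== VERDICT (by name: the statement is the Claim_ definition above) =====
theorem getSideCombo_spec : Claim_equal_getSideCombo := by
  intro isRowCombo spot occ _
  unfold Spec_getSideCombo
  cases isRowCombo with
  | true =>
    have hs' : (PySem.Int.mod spot 15 == PySem.Int.mod spot 15) = true := by simp
    have hF : ∀ loc, (PySem.Int.mod loc 15 == PySem.Int.mod spot 15) = true →
        (occ.contains (loc + 15) && (fun (_ : Int) => true) loc)
          = pvQ occ (fun v => PySem.Int.mod v 15 == PySem.Int.mod spot 15) (loc + 15) := by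
      intro loc h
      have honl : (PySem.Int.mod (loc + 15) 15 == PySem.Int.mod spot 15) = true := by
        simp only [beq_iff_eq,
          PySem.Int.mod_eq_emod_of_pos (show (0 : Int) < 15 by norm_num)] at h ⊢
        omega
      simp only [pvQ]
      rw [honl]
    have hB : ∀ loc, (PySem.Int.mod loc 15 == PySem.Int.mod spot 15) = true →
        (occ.contains (loc - 15) && (fun (_ : Int) => true) loc)
          = pvQ occ (fun v => PySem.Int.mod v 15 == PySem.Int.mod spot 15) (loc - 15) := by
      intro loc h
      have honl : (PySem.Int.mod (loc - 15) 15 == PySem.Int.mod spot 15) = true := by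
        simp only [beq_iff_eq,
          PySem.Int.mod_eq_emod_of_pos (show (0 : Int) < 15 by norm_num)] at h ⊢
        omega
      simp only [pvQ]
      rw [honl]
    have hform : ∀ v, (PySem.Int.mod v 15 == PySem.Int.mod spot 15) = true →
        ∃ t : Int, v = spot + 15 * t := by
      intro v h
      simp only [beq_iff_eq,
        PySem.Int.mod_eq_emod_of_pos (show (0 : Int) < 15 by norm_num)] at h
      exact ⟨(v - spot) / 15, by omega⟩
    show (if pvDownA occ 15 (fun _ => true) (occ.length + 1) spot
              (pvUpA occ 15 (fun _ => true) (occ.length + 1) spot [spot]) = [spot]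
          then ([] : List Int)
          else pvDownA occ 15 (fun _ => true) (occ.length + 1) spot
              (pvUpA occ 15 (fun _ => true) (occ.length + 1) spot [spot])) =
         (if (pvRunB 15 spot (PySem.List.sorted (PySem.Set.union (PySem.Set.ofList
                (occ.filter (fun v => PySem.Int.mod v 15 == PySem.Int.mod spot 15))) [spot])
                (fun x => x) false) []).length > 1
          then pvRunB 15 spot (PySem.List.sorted (PySem.Set.union (PySem.Set.ofList
                (occ.filter (fun v => PySem.Int.mod v 15 == PySem.Int.mod spot 15))) [spot])
                (fun x => x) false) []
          else [])
    rw [set_union_singleton]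
    exact pv_main occ spot 15 (by norm_num) _ _ _ hs' hF hB hform
  | false =>
    have hs' : (PySem.Int.floordiv spot 15 == PySem.Int.floordiv spot 15) = true := by simp
    have hF : ∀ loc, (PySem.Int.floordiv loc 15 == PySem.Int.floordiv spot 15) = true →
        (occ.contains (loc + 1) && (PySem.Int.mod loc 15 != 14))
          = pvQ occ (fun v => PySem.Int.floordiv v 15 == PySem.Int.floordiv spot 15) (loc + 1) := by
      intro loc h
      simp only [beq_iff_eq,
        PySem.Int.floordiv_eq_ediv_of_pos (show (0 : Int) < 15 by norm_num)] at h
      simp only [pvQ]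
      congr 1
      rw [Bool.eq_iff_iff]
      simp only [bne_iff_ne, ne_eq, beq_iff_eq,
        PySem.Int.mod_eq_emod_of_pos (show (0 : Int) < 15 by norm_num),
        PySem.Int.floordiv_eq_ediv_of_pos (show (0 : Int) < 15 by norm_num)]
      omega
    have hB : ∀ loc, (PySem.Int.floordiv loc 15 == PySem.Int.floordiv spot 15) = true →
        (occ.contains (loc - 1) && (PySem.Int.mod loc 15 != 0))
          = pvQ occ (fun v => PySem.Int.floordiv v 15 == PySem.Int.floordiv spot 15) (loc - 1) := by
      intro loc h
      simp only [beq_iff_eq,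
        PySem.Int.floordiv_eq_ediv_of_pos (show (0 : Int) < 15 by norm_num)] at h
      simp only [pvQ]
      congr 1
      rw [Bool.eq_iff_iff]
      simp only [bne_iff_ne, ne_eq, beq_iff_eq,
        PySem.Int.mod_eq_emod_of_pos (show (0 : Int) < 15 by norm_num),
        PySem.Int.floordiv_eq_ediv_of_pos (show (0 : Int) < 15 by norm_num)]
      omega
    have hform : ∀ v, (PySem.Int.floordiv v 15 == PySem.Int.floordiv spot 15) = true →
        ∃ t : Int, v = spot + 1 * t := by
      intro v _
      exact ⟨v - spot, by ring⟩
    show (if pvDownA occ 1 (fun loc => PySem.Int.mod loc 15 != 0) (occ.length + 1) spot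
              (pvUpA occ 1 (fun loc => PySem.Int.mod loc 15 != 14) (occ.length + 1) spot [spot]) = [spot]
          then ([] : List Int)
          else pvDownA occ 1 (fun loc => PySem.Int.mod loc 15 != 0) (occ.length + 1) spot
              (pvUpA occ 1 (fun loc => PySem.Int.mod loc 15 != 14) (occ.length + 1) spot [spot])) =
         (if (pvRunB 1 spot (PySem.List.sorted (PySem.Set.union (PySem.Set.ofList
                (occ.filter (fun v => PySem.Int.floordiv v 15 == PySem.Int.floordiv spot 15))) [spot])
                (fun x => x) false) []).length > 1
          then pvRunB 1 spot (PySem.List.sorted (PySem.Set.union (PySem.Set.ofList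
                (occ.filter (fun v => PySem.Int.floordiv v 15 == PySem.Int.floordiv spot 15))) [spot])
                (fun x => x) false) []
          else [])
    rw [set_union_singleton]
    exact pv_main occ spot 1 (by norm_num) _ _ _ hs' hF hB hform
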